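-- pv_equiv track=rewrite | github.com/acxtodd/salesforce_bi | lambda/appflow_health_check/index.py | _match_cdc_flows
-- ===== SOURCE A (Python) =====
-- CDC_FLOW_BASES = [
--     "salesforce-ai-search-cdc-account",
--     "salesforce-ai-search-cdc-contact",
--     "salesforce-ai-search-cdc-ascendix__property__c",
--     "salesforce-ai-search-cdc-ascendix__lease__c",
--     "salesforce-ai-search-cdc-ascendix__availability__c",
-- ]
--
-- def _match_cdc_flows(flows):
--     # List per base rather than a single entry: during a generation replacement
--     # an old Suspended flow and a new Active flow can briefly coexist. Keeping
--     # both means the evaluator can flag the stale flow instead of letting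
--     # AppFlow list-order hide it.
--     matches = {base: [] for base in CDC_FLOW_BASES}
--     for flow in flows:
--         name = flow.get("flowName", "")
--         for base in CDC_FLOW_BASES:
--             # Exact base (no appflowGeneration) or base followed by "-<suffix>".
--             if name == base or name.startswith(f"{base}-"):
--                 matches[base].append(
--                     {
--                         "name": name,
--                         "status": flow.get("flowStatus", "UNKNOWN"),
--                     }
--                 )
--                 break
--     return matches
-- ===== SOURCE B (Python) =====
-- CDC_FLOW_BASES = [
--     "salesforce-ai-search-cdc-account",
--     "salesforce-ai-search-cdc-contact",
--     "salesforce-ai-search-cdc-ascendix__property__c",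
--     "salesforce-ai-search-cdc-ascendix__lease__c",
--     "salesforce-ai-search-cdc-ascendix__availability__c",
-- ]
--
--
-- def _match_cdc_flows(flows):
--     # Base-major decomposition: one filtering scan of the flow list per base.
--     # Correct because the bases are mutually non-prefix, so a flow name can
--     # match at most one base and dropping A's `break` cannot double-assign.
--     flows = list(flows)
--     return {
--         base: [
--             {
--                 "name": f.get("flowName", ""),
--                 "status": f.get("flowStatus", "UNKNOWN"),
--             }
--             for f in flows
--             if f.get("flowName", "") == base
--             or f.get("flowName", "").startswith(base + "-")
--         ]
--         for base in CDC_FLOW_BASES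
--     }
-- ===== Notes on version B (the rewrite author's own statement) =====
-- stated objective: alternative
-- what changed: Replaces A's single pass over flows with a first-match inner loop and break (flow-major, dict mutation) by a base-major dict comprehension that filters the flow list once per base, relying on the bases being mutually non-prefix.
import Mathlib
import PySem

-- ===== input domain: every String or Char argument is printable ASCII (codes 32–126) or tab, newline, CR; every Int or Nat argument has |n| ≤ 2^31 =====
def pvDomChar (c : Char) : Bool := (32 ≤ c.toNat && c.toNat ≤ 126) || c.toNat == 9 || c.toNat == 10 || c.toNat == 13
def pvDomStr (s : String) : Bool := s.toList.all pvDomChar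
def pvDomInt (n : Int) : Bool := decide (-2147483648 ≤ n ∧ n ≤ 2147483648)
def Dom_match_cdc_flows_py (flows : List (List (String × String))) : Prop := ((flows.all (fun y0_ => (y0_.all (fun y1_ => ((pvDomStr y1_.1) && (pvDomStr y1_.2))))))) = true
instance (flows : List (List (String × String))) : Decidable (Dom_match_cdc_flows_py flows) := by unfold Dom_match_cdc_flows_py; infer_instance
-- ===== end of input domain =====

-- B replaces A's flow-major pass (first-match inner loop with break, mutating a dict)
-- by a base-major build: one filtering scan of the flow list per base.

-- ===== PORT A =====
def pvBases : List String := ["salesforce-ai-search-cdc-account", "salesforce-ai-search-cdc-contact", "salesforce-ai-search-cdc-ascendix__property__c", "salesforce-ai-search-cdc-ascendix__lease__c", "salesforce-ai-search-cdc-ascendix__availability__c"]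

-- inner `for base in CDC_FLOW_BASES: ... break` loop of A
def pvMatchLoop (d : PySem.Dict String (List (List (String × String)))) (nm : String)
    (fl : List (String × String)) : List String → PySem.Dict String (List (List (String × String)))
  | [] => d
  | base :: rest =>
      if nm == base || PySem.Str.startswith nm (base ++ "-") then
        d.modify base [] (fun l => l ++ [[("name", nm), ("status", (PySem.Dict.mk fl).getD "flowStatus" "UNKNOWN")]])
      else pvMatchLoop d nm fl rest

def match_cdc_flows_py (flows : List (List (String × String))) : List (String × List (List (String × String))) :=
  let ms := pvBases.foldl (fun d base => d.insert base ([] : List (List (String × String)))) PySem.Dict.empty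
  (flows.foldl (fun d fl => pvMatchLoop d ((PySem.Dict.mk fl).getD "flowName" "") fl pvBases) ms).items

-- ===== PORT B =====
def pvMatches (base : String) (fl : List (String × String)) : Bool :=
  (PySem.Dict.mk fl).getD "flowName" "" == base ||
    PySem.Str.startswith ((PySem.Dict.mk fl).getD "flowName" "") (base ++ "-")

def pvEntry (fl : List (String × String)) : List (String × String) :=
  [("name", (PySem.Dict.mk fl).getD "flowName" ""),
   ("status", (PySem.Dict.mk fl).getD "flowStatus" "UNKNOWN")]

def match_cdc_flows_py_alt (flows : List (List (String × String))) : List (String × List (List (String × String))) :=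
  pvBases.map (fun base => (base, (flows.filter (pvMatches base)).map pvEntry))

-- ===== PRECONDITION & SPEC =====
def Spec_match_cdc_flows_py (flows : List (List (String × String))) (out : List (String × List (List (String × String)))) : Prop := out = match_cdc_flows_py_alt flows
instance (flows : List (List (String × String))) (out : List (String × List (List (String × String)))) : Decidable (Spec_match_cdc_flows_py flows out) := by unfold Spec_match_cdc_flows_py; infer_instance

-- ===== CLAIM (what is proved, stated in full; the proofs are below) =====
def Claim_equal_match_cdc_flows_py : Prop := ∀ (flows : List (List (String × String))), Dom_match_cdc_flows_py flows → Spec_match_cdc_flows_py flows (match_cdc_flows_py flows)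

-- ===== LEMMAS AND PROOFS =====

-- No two of the (concrete, mutually non-prefix) bases can match the same name.
lemma pv_excl (b b' n : String)
    (h1 : PySem.Str.startswith b (b' ++ "-") = false)
    (h2 : PySem.Str.startswith b' (b ++ "-") = false)
    (h3 : ¬ (b ++ "-").toList <+: (b' ++ "-").toList)
    (h4 : ¬ (b' ++ "-").toList <+: (b ++ "-").toList)
    (hc : (n == b || PySem.Str.startswith n (b ++ "-")) = true) :
    (n == b' || PySem.Str.startswith n (b' ++ "-")) = false := by
  have g1 : (n == b') = false := by
    apply beq_eq_false_iff_ne.mpr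
    rintro rfl
    simp only [Bool.or_eq_true, beq_iff_eq] at hc
    rcases hc with rfl | hpre
    · exact h3 (List.prefix_refl _)
    · rw [hpre] at h2; cases h2
  have g2 : PySem.Str.startswith n (b' ++ "-") = false := by
    cases hsw : PySem.Str.startswith n (b' ++ "-") with
    | false => rfl
    | true =>
      have hp' : (b' ++ "-").toList <+: n.toList := by
        simpa using (PySem.Chars.startswith_iff _ _).mp (by simpa using hsw)
      simp only [Bool.or_eq_true, beq_iff_eq] at hc
      rcases hc with rfl | hpre
      · rw [hsw] at h1; cases h1
      · have hp : (b ++ "-").toList <+: n.toList := by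
          simpa using (PySem.Chars.startswith_iff _ _).mp (by simpa using hpre)
        rcases List.prefix_or_prefix_of_prefix hp hp' with h | h
        · exact absurd h h3
        · exact absurd h h4
  rw [g1, g2]; rfl

lemma pvStep_eval (nm : String) (fl : List (String × String))
    (l1 l2 l3 l4 l5 : List (List (String × String))) :
    pvMatchLoop (PySem.Dict.mk [("salesforce-ai-search-cdc-account", l1), ("salesforce-ai-search-cdc-contact", l2), ("salesforce-ai-search-cdc-ascendix__property__c", l3), ("salesforce-ai-search-cdc-ascendix__lease__c", l4), ("salesforce-ai-search-cdc-ascendix__availability__c", l5)]) nm fl pvBases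
      = PySem.Dict.mk [("salesforce-ai-search-cdc-account", (if (nm == "salesforce-ai-search-cdc-account" || PySem.Str.startswith nm ("salesforce-ai-search-cdc-account" ++ "-")) = true then l1 ++ [[("name", nm), ("status", (PySem.Dict.mk fl).getD "flowStatus" "UNKNOWN")]] else l1)), ("salesforce-ai-search-cdc-contact", (if (nm == "salesforce-ai-search-cdc-contact" || PySem.Str.startswith nm ("salesforce-ai-search-cdc-contact" ++ "-")) = true then l2 ++ [[("name", nm), ("status", (PySem.Dict.mk fl).getD "flowStatus" "UNKNOWN")]] else l2)), ("salesforce-ai-search-cdc-ascendix__property__c", (if (nm == "salesforce-ai-search-cdc-ascendix__property__c" || PySem.Str.startswith nm ("salesforce-ai-search-cdc-ascendix__property__c" ++ "-")) = true then l3 ++ [[("name", nm), ("status", (PySem.Dict.mk fl).getD "flowStatus" "UNKNOWN")]] else l3)), ("salesforce-ai-search-cdc-ascendix__lease__c", (if (nm == "salesforce-ai-search-cdc-ascendix__lease__c" || PySem.Str.startswith nm ("salesforce-ai-search-cdc-ascendix__lease__c" ++ "-")) = true then l4 ++ [[("name", nm), ("status", (PySem.Dict.mk fl).getD "flowStatus"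 "UNKNOWN")]] else l4)), ("salesforce-ai-search-cdc-ascendix__availability__c", (if (nm == "salesforce-ai-search-cdc-ascendix__availability__c" || PySem.Str.startswith nm ("salesforce-ai-search-cdc-ascendix__availability__c" ++ "-")) = true then l5 ++ [[("name", nm), ("status", (PySem.Dict.mk fl).getD "flowStatus" "UNKNOWN")]] else l5))] := by
  cases h1 : (nm == "salesforce-ai-search-cdc-account" || PySem.Str.startswith nm ("salesforce-ai-search-cdc-account" ++ "-")) with
  | true =>
    have e2 := pv_excl "salesforce-ai-search-cdc-account" "salesforce-ai-search-cdc-contact" nm (by decide) (by decide) (by decide) (by decide) h1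
    have e3 := pv_excl "salesforce-ai-search-cdc-account" "salesforce-ai-search-cdc-ascendix__property__c" nm (by decide) (by decide) (by decide) (by decide) h1
    have e4 := pv_excl "salesforce-ai-search-cdc-account" "salesforce-ai-search-cdc-ascendix__lease__c" nm (by decide) (by decide) (by decide) (by decide) h1
    have e5 := pv_excl "salesforce-ai-search-cdc-account" "salesforce-ai-search-cdc-ascendix__availability__c" nm (by decide) (by decide) (by decide) (by decide) h1
    simp_all [pvMatchLoop, pvBases, PySem.Dict.modify, PySem.Dict.insert, PySem.Dict.getD, PySem.Dict.get?, PySem.Dict.contains]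
  | false =>
    cases h2 : (nm == "salesforce-ai-search-cdc-contact" || PySem.Str.startswith nm ("salesforce-ai-search-cdc-contact" ++ "-")) with
    | true =>
      have e3 := pv_excl "salesforce-ai-search-cdc-contact" "salesforce-ai-search-cdc-ascendix__property__c" nm (by decide) (by decide) (by decide) (by decide) h2
      have e4 := pv_excl "salesforce-ai-search-cdc-contact" "salesforce-ai-search-cdc-ascendix__lease__c" nm (by decide) (by decide) (by decide) (by decide) h2
      have e5 := pv_excl "salesforce-ai-search-cdc-contact" "salesforce-ai-search-cdc-ascendix__availability__c" nm (by decide) (by decide) (by decide) (by decide) h2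
      simp_all [pvMatchLoop, pvBases, PySem.Dict.modify, PySem.Dict.insert, PySem.Dict.getD, PySem.Dict.get?, PySem.Dict.contains]
    | false =>
      cases h3 : (nm == "salesforce-ai-search-cdc-ascendix__property__c" || PySem.Str.startswith nm ("salesforce-ai-search-cdc-ascendix__property__c" ++ "-")) with
      | true =>
        have e4 := pv_excl "salesforce-ai-search-cdc-ascendix__property__c" "salesforce-ai-search-cdc-ascendix__lease__c" nm (by decide) (by decide) (by decide) (by decide) h3
        have e5 := pv_excl "salesforce-ai-search-cdc-ascendix__property__c" "salesforce-ai-search-cdc-ascendix__availability__c" nm (by decide) (by decide) (by decide) (by decide) h3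
        simp_all [pvMatchLoop, pvBases, PySem.Dict.modify, PySem.Dict.insert, PySem.Dict.getD, PySem.Dict.get?, PySem.Dict.contains]
      | false =>
        cases h4 : (nm == "salesforce-ai-search-cdc-ascendix__lease__c" || PySem.Str.startswith nm ("salesforce-ai-search-cdc-ascendix__lease__c" ++ "-")) with
        | true =>
          have e5 := pv_excl "salesforce-ai-search-cdc-ascendix__lease__c" "salesforce-ai-search-cdc-ascendix__availability__c" nm (by decide) (by decide) (by decide) (by decide) h4
          simp_all [pvMatchLoop, pvBases, PySem.Dict.modify, PySem.Dict.insert, PySem.Dict.getD, PySem.Dict.get?, PySem.Dict.contains]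
        | false =>
          cases h5 : (nm == "salesforce-ai-search-cdc-ascendix__availability__c" || PySem.Str.startswith nm ("salesforce-ai-search-cdc-ascendix__availability__c" ++ "-")) with
          | true =>
            simp_all [pvMatchLoop, pvBases, PySem.Dict.modify, PySem.Dict.insert, PySem.Dict.getD, PySem.Dict.get?, PySem.Dict.contains]
          | false =>
            simp_all [pvMatchLoop, pvBases]

lemma pv_loop (flows : List (List (String × String)))
    (l1 l2 l3 l4 l5 : List (List (String × String))) :
    (flows.foldl (fun d fl => pvMatchLoop d ((PySem.Dict.mk fl).getD "flowName" "") fl pvBases)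
        (PySem.Dict.mk [("salesforce-ai-search-cdc-account", l1), ("salesforce-ai-search-cdc-contact", l2), ("salesforce-ai-search-cdc-ascendix__property__c", l3), ("salesforce-ai-search-cdc-ascendix__lease__c", l4), ("salesforce-ai-search-cdc-ascendix__availability__c", l5)])).items
      = [("salesforce-ai-search-cdc-account", l1 ++ (flows.filter (pvMatches "salesforce-ai-search-cdc-account")).map pvEntry), ("salesforce-ai-search-cdc-contact", l2 ++ (flows.filter (pvMatches "salesforce-ai-search-cdc-contact")).map pvEntry), ("salesforce-ai-search-cdc-ascendix__property__c", l3 ++ (flows.filter (pvMatches "salesforce-ai-search-cdc-ascendix__property__c")).map pvEntry), ("salesforce-ai-search-cdc-ascendix__lease__c", l4 ++ (flows.filter (pvMatches "salesforce-ai-search-cdc-ascendix__lease__c")).map pvEntry), ("salesforce-ai-search-cdc-ascendix__availability__c", l5 ++ (flows.filter (pvMatches "salesforce-ai-search-cdc-ascendix__availability__c")).map pvEntry)] := by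
  induction flows generalizing l1 l2 l3 l4 l5 with
  | nil => simp
  | cons f fs ih =>
    simp only [List.foldl_cons]
    rw [pvStep_eval, ih]
    simp only [pvMatches, List.filter_cons]
    split_ifs <;> simp_all [pvEntry]

theorem match_cdc_flows_py_spec : Claim_equal_match_cdc_flows_py := by
  intro flows _
  show match_cdc_flows_py flows = match_cdc_flows_py_alt flows
  unfold match_cdc_flows_py
  have hinit : pvBases.foldl (fun d base => d.insert base ([] : List (List (String × String)))) PySem.Dict.empty
      = PySem.Dict.mk [("salesforce-ai-search-cdc-account", []), ("salesforce-ai-search-cdc-contact", []), ("salesforce-ai-search-cdc-ascendix__property__c", []), ("salesforce-ai-search-cdc-ascendix__lease__c", []), ("salesforce-ai-search-cdc-ascendix__availability__c", [])] := by rfl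
  rw [hinit, pv_loop]
  simp [match_cdc_flows_py_alt, pvBases]
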